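-- pv_equiv track=rewrite | github.com/andylshort/advent-of-code-2025 | day-1/src/part_2.py | clicker
-- ===== SOURCE A (Python) =====
-- MIN_LIMIT = 0
--
-- MAX_LIMIT = 99
--
-- def clicker(start: int, clicks: int, negative: bool) -> tuple[int, int]:
--     current = start
--     zeroes_passed = 0
--     clicks_left = clicks
--
--     for _ in range(clicks):
--         if negative:
--             current -= 1
--         else:
--             current += 1
--
--         if current < MIN_LIMIT:
--             current = MAX_LIMIT
--         elif current > MAX_LIMIT:
--             current = MIN_LIMIT
--
--         clicks_left -= 1
--         if current == 0 and clicks_left > 0: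
--             zeroes_passed += 1
--
--     return current, zeroes_passed
-- ===== SOURCE B (Python) =====
-- MIN_LIMIT = 0
--
-- MAX_LIMIT = 99
--
-- def clicker(start: int, clicks: int, negative: bool) -> tuple[int, int]:
--     if clicks <= 0:
--         return start, 0
--     d = -1 if negative else 1
--     first = start + d
--     if first < MIN_LIMIT:
--         first = MAX_LIMIT
--     elif first > MAX_LIMIT:
--         first = MIN_LIMIT
--     final = (first + d * (clicks - 1)) % 100
--     r = (-d * first) % 100
--     zeroes = 0 if r > clicks - 2 else (clicks - 2 - r) // 100 + 1
--     return final, zeroes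
-- ===== Notes on version B (the rewrite author's own statement) =====
-- stated objective: faster
-- what changed: B replaces A's click-by-click loop with O(1) closed-form modular arithmetic: the position after the first (normalizing) click plus clicks-1 steps mod 100, and the number of zero-passes counted directly by a floor-division formula.
import Mathlib
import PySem

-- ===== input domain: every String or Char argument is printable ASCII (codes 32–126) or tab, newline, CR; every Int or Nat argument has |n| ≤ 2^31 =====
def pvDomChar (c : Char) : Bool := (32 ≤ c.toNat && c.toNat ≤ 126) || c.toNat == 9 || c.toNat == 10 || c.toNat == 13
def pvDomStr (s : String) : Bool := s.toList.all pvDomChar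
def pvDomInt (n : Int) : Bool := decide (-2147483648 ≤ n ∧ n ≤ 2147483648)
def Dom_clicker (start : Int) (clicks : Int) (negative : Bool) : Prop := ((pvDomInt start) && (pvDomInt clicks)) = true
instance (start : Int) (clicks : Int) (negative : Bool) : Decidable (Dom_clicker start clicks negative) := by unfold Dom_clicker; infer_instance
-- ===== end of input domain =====

-- B replaces A's click-by-click simulation by O(1) closed-form modular arithmetic
-- (final position and the count of zero-passes computed directly); objective: faster.

-- ===== PORT A =====
def MIN_LIMIT : Int := 0

def MAX_LIMIT : Int := 99

-- the loop body of A, once per click (state = (current, zeroes_passed, clicks_left))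
def clickStep (negative : Bool) (st : Int × Int × Int) : Int × Int × Int :=
  let current := st.1
  let zeroes := st.2.1
  let clicks_left := st.2.2
  let current := if negative then current - 1 else current + 1
  let current := if current < MIN_LIMIT then MAX_LIMIT
                 else if current > MAX_LIMIT then MIN_LIMIT else current
  let clicks_left := clicks_left - 1
  let zeroes := if current = 0 ∧ clicks_left > 0 then zeroes + 1 else zeroes
  (current, zeroes, clicks_left)

def clicker (start : Int) (clicks : Int) (negative : Bool) : Int × Int :=
  let fin := (PySem.List.pyRange 0 clicks 1).foldl (fun st _ => clickStep negative st)
              (start, 0, clicks)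
  (fin.1, fin.2.1)

-- ===== PORT B =====
def clicker_alt (start : Int) (clicks : Int) (negative : Bool) : Int × Int :=
  if clicks ≤ 0 then (start, 0)
  else
    let d : Int := if negative then -1 else 1
    let first0 := start + d
    let first := if first0 < MIN_LIMIT then MAX_LIMIT
                 else if first0 > MAX_LIMIT then MIN_LIMIT else first0
    let final := PySem.Int.mod (first + d * (clicks - 1)) 100
    let r := PySem.Int.mod (-d * first) 100
    let zeroes := if r > clicks - 2 then 0 else PySem.Int.floordiv (clicks - 2 - r) 100 + 1
    (final, zeroes)

-- ===== PRECONDITION & SPEC =====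
def Spec_clicker (start : Int) (clicks : Int) (negative : Bool) (out : Int × Int) : Prop := out = clicker_alt start clicks negative
instance (start : Int) (clicks : Int) (negative : Bool) (out : Int × Int) : Decidable (Spec_clicker start clicks negative out) := by unfold Spec_clicker; infer_instance

-- ===== CLAIM (what is proved, stated in full; the proofs are below) =====
def Claim_equal_clicker : Prop := ∀ (start : Int) (clicks : Int) (negative : Bool), Dom_clicker start clicks negative → Spec_clicker start clicks negative (clicker start clicks negative)

-- ===== LEMMAS AND PROOFS =====

-- the direction of one click
def dd (negative : Bool) : Int := if negative then -1 else 1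

-- closed-form count of j ∈ [1, n-1] with j % 100 = r  (for 0 ≤ r < 100)
def F (r n : Nat) : Int :=
  if r = 0 then ((n - 1) / 100 : Nat)
  else if r < n then (((n - 1 - r) / 100 : Nat) + 1)
  else 0

-- iterating A's loop body n times
def iterN (negative : Bool) : Nat → Int × Int × Int → Int × Int × Int
  | 0, st => st
  | n + 1, st => iterN negative n (clickStep negative st)

lemma foldl_const_step (negative : Bool) (l : List Int) (st : Int × Int × Int) :
    l.foldl (fun s _ => clickStep negative s) st = iterN negative l.length st := by
  induction l generalizing st with
  | nil => rfl
  | cons a t ih => simp [iterN, ih]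

lemma clickStep_eq (negative : Bool) (c z m : Int) (h0 : 0 ≤ c) (h1 : c ≤ 99) :
    clickStep negative (c, z, m) =
      ((c + dd negative) % 100,
       (if (c + dd negative) % 100 = 0 ∧ m - 1 > 0 then z + 1 else z), m - 1) := by
  cases negative <;>
    simp only [clickStep, dd, MIN_LIMIT, MAX_LIMIT, if_true, if_false, Bool.false_eq_true] <;>
    split_ifs <;> simp_all <;> omega

lemma F_zero (r : Nat) : F r 0 = 0 := by
  unfold F; split_ifs <;> omega

lemma F_step (r r' n : Nat) (hrel : r' + 1 = r ∨ (r = 0 ∧ r' = 99)) :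
    F r (n + 1) = (if r' = 0 ∧ 0 < n then 1 else 0) + F r' n := by
  unfold F; split_ifs <;> omega

lemma iterN_eq' (negative : Bool) (dv : Int) (hdv : dd negative = dv)
    (hlit : dv = 1 ∨ dv = -1) (n : Nat) :
    ∀ c z : Int, 0 ≤ c → c ≤ 99 →
      iterN negative n (c, z, (n : Int)) =
        ((c + dv * n) % 100, z + F ((-dv * c) % 100).toNat n, 0) := by
  induction n with
  | zero =>
      intro c z h0 h1
      refine Prod.ext ?_ (Prod.ext ?_ rfl)
      · simp [iterN]; omega
      · simp [iterN, F_zero]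
  | succ n ih =>
      intro c z h0 h1
      have hstep := clickStep_eq negative c z ((n : Int) + 1) h0 h1
      rw [hdv] at hstep
      have hm : ((n : Int) + 1) - 1 = (n : Int) := by omega
      rw [show ((n + 1 : Nat) : Int) = (n : Int) + 1 by push_cast; ring]
      show iterN negative n (clickStep negative (c, z, (n : Int) + 1)) = _
      rw [hstep, hm]
      have hb0 : 0 ≤ (c + dv) % 100 := by rcases hlit with rfl | rfl <;> omega
      have hb1 : (c + dv) % 100 ≤ 99 := by rcases hlit with rfl | rfl <;> omega
      have hrel : ((-dv * ((c + dv) % 100)) % 100).toNat + 1 = ((-dv * c) % 100).toNat ∨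
          (((-dv * c) % 100).toNat = 0 ∧ ((-dv * ((c + dv) % 100)) % 100).toNat = 99) := by
        rcases hlit with rfl | rfl <;> omega
      have hzero : ((c + dv) % 100 = 0) ↔ ((-dv * ((c + dv) % 100)) % 100).toNat = 0 := by
        rcases hlit with rfl | rfl <;> omega
      rcases em ((c + dv) % 100 = 0 ∧ (n : Int) > 0) with hcond | hcond
      · rw [if_pos hcond, ih _ _ hb0 hb1]
        refine Prod.ext ?_ (Prod.ext ?_ rfl)
        · rcases hlit with rfl | rfl <;> push_cast <;> ring_nf <;> omega
        · show z + 1 + F _ n = z + F _ (n + 1)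
          rw [F_step _ _ n hrel, if_pos ⟨hzero.mp hcond.1, by omega⟩]
          ring
      · rw [if_neg hcond, ih _ _ hb0 hb1]
        refine Prod.ext ?_ (Prod.ext ?_ rfl)
        · rcases hlit with rfl | rfl <;> push_cast <;> ring_nf <;> omega
        · show z + F _ n = z + F _ (n + 1)
          rw [F_step _ _ n hrel]
          have : ¬ (((-dv * ((c + dv) % 100)) % 100).toNat = 0 ∧ 0 < n) := by
            intro ⟨ha, hb⟩
            exact hcond ⟨hzero.mpr ha, by omega⟩
          rw [if_neg this]
          ring

lemma assemble (c1 : Int) (d : Int) (n : Nat) (hd : d = 1 ∨ d = -1) (h0 : 0 ≤ c1) (h1 : c1 ≤ 99) :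
    (if (-d * c1) % 100 > ((n : Int) + 1) - 2 then 0
     else PySem.Int.floordiv (((n : Int) + 1) - 2 - (-d * c1) % 100) 100 + 1)
      = (if c1 = 0 ∧ (n : Int) > 0 then 1 else 0) + F (((-d * c1) % 100).toNat) n := by
  rw [show PySem.Int.floordiv (((n : Int) + 1) - 2 - (-d * c1) % 100) 100
        = (((n : Int) + 1) - 2 - (-d * c1) % 100) / 100
      from PySem.Int.floordiv_eq_ediv_of_pos (by norm_num)]
  unfold F
  rcases hd with rfl | rfl <;> split_ifs <;> omega

-- ===== VERDICT (by name: the statement is the Claim_ definition above) =====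
theorem clicker_spec : Claim_equal_clicker := by
  intro start clicks negative _hdom
  unfold Spec_clicker
  by_cases hc : clicks ≤ 0
  · simp [clicker, clicker_alt, hc, PySem.List.pyRange_one_eq_nil (by omega : clicks ≤ 0)]
  · push_neg at hc
    obtain ⟨n, hn⟩ : ∃ n : Nat, clicks = (n : Int) + 1 := ⟨(clicks - 1).toNat, by omega⟩
    subst hn
    set d : Int := if negative then -1 else 1 with hd
    have hdd : dd negative = d := by cases negative <;> simp [dd, hd]
    have hdlit : d = 1 ∨ d = -1 := by cases negative <;> simp [hd]
    set c1 : Int := if start + d < 0 then 99 else if start + d > 99 then 0 else start + d with hc1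
    have hb0 : 0 ≤ c1 := by rw [hc1]; split_ifs <;> omega
    have hb1 : c1 ≤ 99 := by rw [hc1]; split_ifs <;> omega
    have hfirst : clickStep negative (start, 0, (n : Int) + 1) =
        (c1, (if c1 = 0 ∧ (n : Int) > 0 then 1 else 0), (n : Int)) := by
      rcases hdlit with h | h <;> cases negative <;>
        simp only [clickStep, hc1, MIN_LIMIT, MAX_LIMIT] <;> simp_all <;>
        split_ifs <;> simp_all <;> omega
    have hlen : (PySem.List.pyRange 0 ((n : Int) + 1) 1).length = n + 1 := by
      rw [PySem.List.length_pyRange_one]; omega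
    have hiter := iterN_eq' negative d hdd hdlit n c1 (if c1 = 0 ∧ (n : Int) > 0 then 1 else 0) hb0 hb1
    have hA : clicker start ((n : Int) + 1) negative =
        ((c1 + d * n) % 100,
         (if c1 = 0 ∧ (n : Int) > 0 then 1 else 0) + F ((-d * c1) % 100).toNat n) := by
      unfold clicker
      rw [foldl_const_step, hlen]
      have h1 : iterN negative (n + 1) (start, 0, (n : Int) + 1)
          = iterN negative n (c1, (if c1 = 0 ∧ (n : Int) > 0 then 1 else 0), (n : Int)) := by
        rw [iterN, hfirst]
      rw [h1, hiter]
    have hB : clicker_alt start ((n : Int) + 1) negative =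
        ((c1 + d * n) % 100,
         if (-d * c1) % 100 > ((n : Int) + 1) - 2 then 0
         else PySem.Int.floordiv (((n : Int) + 1) - 2 - (-d * c1) % 100) 100 + 1) := by
      unfold clicker_alt
      rw [if_neg (by omega : ¬ ((n : Int) + 1 ≤ 0))]
      simp only [MIN_LIMIT, MAX_LIMIT, ← hc1]
      rw [PySem.Int.mod_eq_emod_of_pos (by norm_num),
          PySem.Int.mod_eq_emod_of_pos (by norm_num),
          show ((n : Int) + 1) - 1 = (n : Int) by omega]
    rw [hA, hB, assemble c1 d n hdlit hb0 hb1]
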